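-- pv_equiv track=rewrite | github.com/ayansengupta998/Connect383_bot_sergei_jr | agents.py | true_eval
-- ===== SOURCE A (Python) =====
-- def true_eval(run): #function that calculates the evaluation function
--     """Instead of adding score when the streak length is 3 or more we look at any instance where 2 similar symbol (X or 0)"""
--     rets = []
--     prev = run[0]
--     curr_len = 1
--     p1_score = 0
--     p2_score = 0
--     for curr in run[1:]:
--         if curr == prev:
--             curr_len += 1
--         else:
--             if curr_len > 2:
--                 rets.append((prev, curr_len))
--                 if prev == 1:
--                     p1_score += curr_len**2
--                 elif prev == -1:
--                     p2_score += curr_len**2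
--             prev = curr
--             curr_len = 1
--     if curr_len > 2:
--         rets.append((prev, curr_len))
--         if prev == 1:
--             p1_score += curr_len**2
--         elif prev == -1:
--             p2_score += curr_len**2
--     return p1_score - p2_score
-- ===== SOURCE B (Python) =====
-- def true_eval(run):
--     total = 0
--     rest = run
--     while rest:
--         sym = rest[0]
--         L = 1
--         while L < len(rest) and rest[L] == sym:
--             L += 1
--         if L > 2 and sym in (1, -1):
--             total += sym * L * L
--         rest = rest[L:]
--     return total
-- ===== Notes on version B (the rewrite author's own statement) =====
-- stated objective: simpler
-- what changed: Replaces the prev/curr_len/p1_score/p2_score state machine (with a duplicated end-of-loop flush) by a group-at-a-time scan: peel each maximal run off the front, add sym*len**2 signed directly into one total.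
import Mathlib
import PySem

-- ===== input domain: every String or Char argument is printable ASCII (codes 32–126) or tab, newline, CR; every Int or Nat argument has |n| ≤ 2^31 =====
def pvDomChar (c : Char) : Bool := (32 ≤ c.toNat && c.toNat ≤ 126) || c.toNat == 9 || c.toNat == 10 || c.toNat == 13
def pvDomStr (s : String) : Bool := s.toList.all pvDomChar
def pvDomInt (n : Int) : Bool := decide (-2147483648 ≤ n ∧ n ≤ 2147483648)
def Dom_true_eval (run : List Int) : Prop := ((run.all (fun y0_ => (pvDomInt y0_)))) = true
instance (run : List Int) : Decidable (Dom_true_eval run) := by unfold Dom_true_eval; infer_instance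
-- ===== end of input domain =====

-- B replaces A's prev/curr_len/two-score state machine (with duplicated final flush) by a
-- simpler group-at-a-time scan accumulating one signed total; same values wherever A returns.


-- ===== PORT A =====
-- loop body of A: state (prev, curr_len, p1_score, p2_score)
def trueEvalStep (s : Int × Int × Int × Int) (curr : Int) : Int × Int × Int × Int :=
  match s with
  | (prev, currLen, p1, p2) =>
    if curr = prev then (prev, currLen + 1, p1, p2)
    else
      if currLen > 2 then
        if prev = 1 then (curr, 1, p1 + currLen ^ 2, p2)
        else if prev = -1 then (curr, 1, p1, p2 + currLen ^ 2)
        else (curr, 1, p1, p2)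
      else (curr, 1, p1, p2)

-- final flush after the loop, then return p1_score - p2_score
def trueEvalFin (s : Int × Int × Int × Int) : Int :=
  match s with
  | (prev, currLen, p1, p2) =>
    if currLen > 2 then
      if prev = 1 then (p1 + currLen ^ 2) - p2
      else if prev = -1 then p1 - (p2 + currLen ^ 2)
      else p1 - p2
    else p1 - p2

def true_eval (run : List Int) : Int :=
  match run with
  | [] => 0  -- Python A raises IndexError here (run[0]); excluded by Pre_true_eval
  | h :: t => trueEvalFin (t.foldl trueEvalStep (h, 1, 0, 0))

-- ===== PORT B =====
-- B's outer while loop: peel one maximal run (inner while = count of equal prefix) per step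
def altGo : List Int → Int → Int
  | [], total => total
  | h :: t, total =>
    let L : Int := 1 + ((t.takeWhile (fun x => x == h)).length : Int)
    let total' := if L > 2 ∧ (h = 1 ∨ h = -1) then total + h * L * L else total
    altGo (t.dropWhile (fun x => x == h)) total'
termination_by l _ => l.length
decreasing_by
  exact Nat.lt_succ_of_le (List.length_dropWhile_le _ _)

def true_eval_alt (run : List Int) : Int := altGo run 0

-- ===== PRECONDITION & SPEC =====
-- Pre_ excludes only the empty list, on which A raises IndexError (run[0]).
def Pre_true_eval (run : List Int) : Prop := run ≠ []
instance (run : List Int) : Decidable (Pre_true_eval run) := by unfold Pre_true_eval; infer_instance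
def pvWitness_true_eval : List Int := ([1, 1, 1, -1, -1, -1, 0])

def Spec_true_eval (run : List Int) (out : Int) : Prop := out = true_eval_alt run
instance (run : List Int) (out : Int) : Decidable (Spec_true_eval run out) := by unfold Spec_true_eval; infer_instance

-- ===== CLAIM (what is proved, stated in full; the proofs are below) =====
def Claim_equal_true_eval : Prop := ∀ (run : List Int), Dom_true_eval run → Pre_true_eval run → Spec_true_eval run (true_eval run)

-- ===== LEMMAS AND PROOFS =====
-- contribution of one maximal run of symbol `prev` and length `L` to the signed score
def contrib (prev L : Int) : Int := if L > 2 ∧ (prev = 1 ∨ prev = -1) then prev * L * L else 0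

theorem contrib_one {L : Int} (h : L > 2) : contrib 1 L = L ^ 2 := by
  unfold contrib; rw [if_pos ⟨h, Or.inl rfl⟩]; ring

theorem contrib_negone {L : Int} (h : L > 2) : contrib (-1) L = -(L ^ 2) := by
  unfold contrib; rw [if_pos ⟨h, Or.inr rfl⟩]; ring

theorem contrib_other {prev L : Int} (h2 : ¬ prev = 1) (h3 : ¬ prev = -1) : contrib prev L = 0 := by
  unfold contrib
  rw [if_neg]
  rintro ⟨-, h | h⟩ <;> [exact h2 h; exact h3 h]

theorem contrib_small (prev : Int) {L : Int} (h1 : ¬ L > 2) : contrib prev L = 0 := by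
  unfold contrib
  rw [if_neg]
  rintro ⟨h, -⟩
  exact h1 h

theorem trueEvalFin_eq (prev currLen p1 p2 : Int) :
    trueEvalFin (prev, currLen, p1, p2) = p1 - p2 + contrib prev currLen := by
  simp only [trueEvalFin]
  by_cases h1 : currLen > 2
  · by_cases h2 : prev = 1
    · subst h2; rw [if_pos h1, if_pos rfl, contrib_one h1]; ring
    · by_cases h3 : prev = -1
      · rw [if_pos h1, if_neg h2, if_pos h3, h3, contrib_negone h1]; ring
      · rw [if_pos h1, if_neg h2, if_neg h3, contrib_other h2 h3]; ring
  · rw [if_neg h1, contrib_small prev h1]; ring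

theorem altGo_shift : ∀ (l : List Int) (total : Int), altGo l total = total + altGo l 0
  | [], total => by simp [altGo]
  | h :: t, total => by
    simp only [altGo]
    rw [altGo_shift (t.dropWhile (fun x => x == h)),
        altGo_shift (t.dropWhile (fun x => x == h))
          (if 1 + ((t.takeWhile (fun x => x == h)).length : Int) > 2 ∧ (h = 1 ∨ h = -1)
           then 0 + h * (1 + ((t.takeWhile (fun x => x == h)).length : Int))
                  * (1 + ((t.takeWhile (fun x => x == h)).length : Int))
           else 0)]
    split_ifs <;> ring
termination_by l _ => l.length
decreasing_by
  all_goals exact Nat.lt_succ_of_le (List.length_dropWhile_le _ _)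

theorem altGo_cons (h : Int) (t : List Int) :
    altGo (h :: t) 0 = contrib h (1 + ((t.takeWhile (fun x => x == h)).length : Int))
      + altGo (t.dropWhile (fun x => x == h)) 0 := by
  simp only [altGo]
  unfold contrib
  rw [altGo_shift]
  split_ifs <;> ring

theorem loop_eq (t : List Int) (prev currLen p1 p2 : Int) :
    trueEvalFin (t.foldl trueEvalStep (prev, currLen, p1, p2))
      = (p1 - p2) + contrib prev (currLen + ((t.takeWhile (fun x => x == prev)).length : Int))
        + altGo (t.dropWhile (fun x => x == prev)) 0 := by
  induction t generalizing prev currLen p1 p2 with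
  | nil => simp [trueEvalFin_eq, altGo]
  | cons c t' ih =>
    by_cases hc : c = prev
    · subst hc
      have hstep : trueEvalStep (c, currLen, p1, p2) c = (c, currLen + 1, p1, p2) := by
        simp [trueEvalStep]
      rw [List.foldl_cons, hstep, ih]
      simp only [List.takeWhile_cons, List.dropWhile_cons, BEq.rfl, if_true, List.length_cons]
      have harg : currLen + 1 + ((t'.takeWhile (fun x => x == c)).length : Int)
          = currLen + (((t'.takeWhile (fun x => x == c)).length + 1 : Nat) : Int) := by
        push_cast; ring
      rw [harg]
    · have hb : (c == prev) = false := by simp [hc]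
      have htw : (c :: t').takeWhile (fun x => x == prev) = [] := by
        simp [hb]
      have hdw : (c :: t').dropWhile (fun x => x == prev) = c :: t' := by
        simp [hb]
      rw [htw, hdw, altGo_cons]
      simp only [List.length_nil, Nat.cast_zero, add_zero]
      by_cases h1 : currLen > 2
      · by_cases h2 : prev = 1
        · have hc' : ¬ c = 1 := h2 ▸ hc
          have hstep : trueEvalStep (prev, currLen, p1, p2) c = (c, 1, p1 + currLen ^ 2, p2) := by
            simp [trueEvalStep, h2, hc', h1]
          rw [List.foldl_cons, hstep, ih, h2, contrib_one h1]; ring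
        · by_cases h3 : prev = -1
          · have hc' : ¬ c = -1 := h3 ▸ hc
            have hstep : trueEvalStep (prev, currLen, p1, p2) c = (c, 1, p1, p2 + currLen ^ 2) := by
              simp [trueEvalStep, h3, hc', h1]
            rw [List.foldl_cons, hstep, ih, h3, contrib_negone h1]; ring
          · have hstep : trueEvalStep (prev, currLen, p1, p2) c = (c, 1, p1, p2) := by
              simp [trueEvalStep, hc, h1, h2, h3]
            rw [List.foldl_cons, hstep, ih, contrib_other h2 h3]; ring
      · have hstep : trueEvalStep (prev, currLen, p1, p2) c = (c, 1, p1, p2) := by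
          simp [trueEvalStep, hc, h1]
        rw [List.foldl_cons, hstep, ih, contrib_small prev h1]; ring

-- ===== VERDICT (by name: the statement is the Claim_ definition above) =====
theorem true_eval_spec : Claim_equal_true_eval := by
  intro run _ hpre
  match run with
  | [] => exact absurd rfl hpre
  | h :: t =>
    show true_eval (h :: t) = true_eval_alt (h :: t)
    rw [true_eval, true_eval_alt, altGo_cons, loop_eq]
    ring
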